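-- pv_equiv track=rewrite | github.com/ousseynoukone/algorythmique | exo7.py | replaceByZero
-- ===== SOURCE A (Python) =====
-- def replaceByZero(string,n):
--     index = []
--     cpt = 0
--     for i in range (0, len(string)) :
--         cpt +=1
--         if(cpt==n):
--             index.append(i)
--             cpt=0
--
--     value = ""
--     for i in range (0, len(string)) :
--         car = string [i]
--
--         if i in index:
--             car = "0"
--
--         value+=car
--     return value
-- ===== SOURCE B (Python) =====
-- def replaceByZero(string, n):
--     if n <= 0:
--         return string
--     parts = []
--     for i in range(0, len(string), n):
--         chunk = string[i:i+n]
--         if len(chunk) == n: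
--             chunk = chunk[:-1] + "0"
--         parts.append(chunk)
--     return "".join(parts)
-- ===== Notes on version B (the rewrite author's own statement) =====
-- stated objective: faster
-- what changed: Replaces A's two-pass index-table strategy (collect replacement indices, then rebuild the string testing 'i in index' with a linear list-membership scan per character) by a single chunking pass that slices the string into blocks of n and rewrites the last character of each full block.
import Mathlib
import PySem

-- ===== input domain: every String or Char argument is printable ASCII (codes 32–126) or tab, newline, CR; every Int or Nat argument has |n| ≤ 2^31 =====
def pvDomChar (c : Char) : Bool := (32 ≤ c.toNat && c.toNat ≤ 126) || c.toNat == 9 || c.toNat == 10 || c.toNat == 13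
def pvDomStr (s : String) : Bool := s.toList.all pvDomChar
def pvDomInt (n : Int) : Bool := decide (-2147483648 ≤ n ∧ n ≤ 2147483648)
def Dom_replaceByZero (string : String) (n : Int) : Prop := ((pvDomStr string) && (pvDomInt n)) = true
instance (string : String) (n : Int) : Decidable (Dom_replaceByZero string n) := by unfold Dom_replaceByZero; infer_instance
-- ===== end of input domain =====

-- B replaces A's index-table-plus-membership-scan (quadratic for small n) with a single
-- linear chunking pass; objective: faster.

-- ===== PORT A =====
-- Literal port of A over string.toList: first loop collects the indices where the counter
-- hits n, second loop rebuilds the string, consulting the index list by membership.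
-- string[i] is ported as getD (exact here: i ranges over 0..len-1, always in range).
def replaceByZero (string : String) (n : Int) : String :=
  let l := string.toList
  let st := (List.range l.length).foldl
    (fun (st : List Nat × Int) i =>
      let cpt := st.2 + 1
      if cpt = n then (st.1 ++ [i], 0) else (st.1, cpt)) ([], 0)
  let index := st.1
  let value := (List.range l.length).foldl
    (fun (value : List Char) i =>
      let car := l.getD i ' '
      let car := if i ∈ index then '0' else car
      value ++ [car]) []
  String.ofList value

-- ===== PORT B =====
-- B's chunk loop: take n characters at a time; a full chunk gets its last char replaced
-- by '0'; the partial tail is kept as is.  Chunks are appended in order ("".join).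
def pvChunks (m : Nat) (hm : 0 < m) (l : List Char) : List Char :=
  if _h : l = [] then []
  else
    let chunk := l.take m
    let chunk := if chunk.length = m then chunk.dropLast ++ ['0'] else chunk
    chunk ++ pvChunks m hm (l.drop m)
termination_by l.length
decreasing_by
  have : l.length ≠ 0 := by simpa [List.length_eq_zero_iff] using _h
  simp only [List.length_drop]; omega

def replaceByZero_alt (string : String) (n : Int) : String :=
  if h : n ≤ 0 then string
  else String.ofList (pvChunks n.toNat (by omega) string.toList)

-- ===== PRECONDITION & SPEC =====
def Spec_replaceByZero (string : String) (n : Int) (out : String) : Prop := out = replaceByZero_alt string n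
instance (string : String) (n : Int) (out : String) : Decidable (Spec_replaceByZero string n out) := by unfold Spec_replaceByZero; infer_instance

-- ===== CLAIM (what is proved, stated in full; the proofs are below) =====
def Claim_equal_replaceByZero : Prop := ∀ (string : String) (n : Int), Dom_replaceByZero string n → Spec_replaceByZero string n (replaceByZero string n)

-- ===== LEMMAS AND PROOFS =====

-- Positions whose character is replaced: i with (i+1) % n = 0 (only possible when 1 ≤ n).
def pvHit (n : Int) (i : Nat) : Bool := decide (((i : Int) + 1) % n = 0 ∧ 1 ≤ n)

-- The common normal form both ports are reduced to.
def pvIdeal (l : List Char) (n : Int) : List Char :=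
  (List.range l.length).map (fun i => if pvHit n i then '0' else l.getD i ' ')

lemma pv_map_getD_range (l : List Char) :
    (List.range l.length).map (fun i => l.getD i ' ') = l := by
  apply List.ext_getElem
  · simp
  · intro i h1 h2
    simp [List.getD_eq_getElem?_getD, List.getElem?_eq_getElem h2]

-- counter value after k iterations of A's first loop
def pvCpt (n : Int) (k : Nat) : Int := if 1 ≤ n then (k : Int) % n else (k : Int)

lemma pv_loop1 (n : Int) (k : Nat) :
    (List.range k).foldl
      (fun (st : List Nat × Int) i =>
        let cpt := st.2 + 1
        if cpt = n then (st.1 ++ [i], 0) else (st.1, cpt)) ([], 0)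
    = ((List.range k).filter (pvHit n), pvCpt n k) := by
  induction k with
  | zero => simp [pvCpt]
  | succ k ih =>
    rw [List.range_succ, List.foldl_append, ih, List.filter_append]
    by_cases hn : 1 ≤ n
    · have h0 : (0:Int) ≤ (k : Int) % n := Int.emod_nonneg _ (by omega)
      have h1 : (k : Int) % n < n := Int.emod_lt_of_pos _ (by omega)
      have hadd : ((k : Int) % n + 1) % n = ((k : Int) + 1) % n := Int.emod_add_emod _ _ _
      by_cases hfull : (k : Int) % n + 1 = n
      · have hz : ((k : Int) + 1) % n = 0 := by
          rw [← hadd, hfull, Int.emod_self]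
        simp [pvCpt, hn, hfull, pvHit, hz]
      · have hlt : (k : Int) % n + 1 < n := by omega
        have hnz : ((k : Int) + 1) % n = (k : Int) % n + 1 := by
          rw [← hadd]; exact Int.emod_eq_of_lt (by omega) hlt
        have hne0 : ¬ (n ∣ (k : Int) + 1) := by
          rw [Int.dvd_iff_emod_eq_zero]; omega
        simp [pvCpt, hn, hfull, pvHit, hnz, hne0]
    · have h1 : ¬ ((k : Int) + 1 = n) := by omega
      simp [pvCpt, hn, pvHit, h1]

lemma pv_loop2 (f : Nat → Char) (L : List Nat) (acc : List Char) :
    L.foldl (fun (v : List Char) i => v ++ [f i]) acc = acc ++ L.map f := by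
  induction L generalizing acc with
  | nil => simp
  | cons a L ih => simp [List.foldl_cons, ih]

lemma pv_A_ideal (string : String) (n : Int) :
    replaceByZero string n = String.ofList (pvIdeal string.toList n) := by
  unfold replaceByZero
  dsimp only
  rw [show (List.foldl
      (fun (st : List Nat × Int) i =>
        let cpt := st.2 + 1
        if cpt = n then (st.1 ++ [i], 0) else (st.1, cpt)) ([], 0)
      (List.range string.toList.length)) = _ from pv_loop1 n string.toList.length,
    pv_loop2]
  congr 1
  unfold pvIdeal
  apply List.map_congr_left
  intro i hi
  simp only [List.mem_range] at hi
  by_cases h : pvHit n i = true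
  · have hmem : i ∈ List.filter (pvHit n) (List.range string.toList.length) := by
      simp only [List.mem_filter, List.mem_range, h, and_true]
      simpa using hi
    rw [if_pos hmem, if_pos h]
  · have hmem : i ∉ List.filter (pvHit n) (List.range string.toList.length) := by
      simp [List.mem_filter, h]
    rw [if_neg hmem, if_neg (by simp [h])]

lemma pv_chunks_ideal (m : Nat) (hm : 0 < m) (l : List Char) :
    pvChunks m hm l
      = (List.range l.length).map (fun i => if (i + 1) % m = 0 then '0' else l.getD i ' ') := by
  induction hk : l.length using Nat.strong_induction_on generalizing l with
  | _ k ih =>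
  subst hk
  rw [pvChunks]
  by_cases h : l = []
  · simp [h]
  · simp only [h, dite_false]
    have hlen : 0 < l.length := List.length_pos_iff.mpr h
    have ihtail := ih (l.drop m).length (by simp [List.length_drop]; omega) (l.drop m) rfl
    rw [ihtail]
    by_cases hfull : m ≤ l.length
    · have htk : (l.take m).length = m := by simp [hfull]
      rw [if_pos htk]
      have hsplit : l.length = m + (l.length - m) := by omega
      rw [hsplit, List.range_add, List.map_append, List.map_map]
      congr 1
      · -- full chunk: dropLast (take m) ++ ['0']
        apply List.ext_getElem
        · simp [htk]; omega
        · intro j hj _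
          simp only [List.length_append, List.length_dropLast, htk,
            List.length_singleton] at hj
          have hj' : j < m := by omega
          by_cases hlast : j = m - 1
          · have : (j + 1) % m = 0 := by
              have : j + 1 = m := by omega
              simp [this]
            simp only [List.getElem_map, List.getElem_range, this]
            rw [List.getElem_append_right (by simp [htk]; omega)]
            simp [htk, hlast]
          · have hlt : j + 1 < m := by omega
            have : (j + 1) % m = j + 1 := Nat.mod_eq_of_lt hlt
            simp only [List.getElem_map, List.getElem_range, this]
            rw [List.getElem_append_left (by simp [htk]; omega)]
            simp [List.getElem_dropLast, List.getD_eq_getElem?_getD,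
              List.getElem?_eq_getElem (by omega : j < l.length)]
      · -- tail chunk: shift indices by m
        simp only [List.length_drop]
        apply List.map_congr_left
        intro i hi
        simp only [List.mem_range] at hi
        have hmod : (m + i + 1) % m = (i + 1) % m := by
          rw [Nat.add_assoc, Nat.add_mod_left]
        have hget : l.getD (m + i) ' ' = (l.drop m).getD i ' ' := by
          simp [List.getD_eq_getElem?_getD, List.getElem?_drop]
        simp [Function.comp, hmod]
    · -- short tail: l.length < m, chunk kept as is, recursion ends
      have hlt : l.length < m := by omega
      have htk : (l.take m).length = l.length := by simp; omega
      have hne : ¬ (l.take m).length = m := by omega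
      have hdrop : l.drop m = [] := by
        apply List.eq_nil_of_length_eq_zero; simp [List.length_drop]; omega
      simp only [hne, ite_false, hdrop]
      rw [List.take_of_length_le (by omega)]
      simp only [List.length_nil, List.range_zero, List.map_nil, List.append_nil]
      have : ∀ i ∈ List.range l.length,
          (if (i + 1) % m = 0 then '0' else l.getD i ' ') = l.getD i ' ' := by
        intro i hi
        simp only [List.mem_range] at hi
        have : (i + 1) % m = i + 1 := Nat.mod_eq_of_lt (by omega)
        simp [this]
      rw [List.map_congr_left this, pv_map_getD_range]

lemma pv_B_ideal (string : String) (n : Int) :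
    replaceByZero_alt string n = String.ofList (pvIdeal string.toList n) := by
  unfold replaceByZero_alt
  by_cases h : n ≤ 0
  · simp only [h, dite_true]
    have : pvIdeal string.toList n = string.toList := by
      unfold pvIdeal
      have : ∀ i ∈ List.range string.toList.length,
          (if pvHit n i then '0' else string.toList.getD i ' ') = string.toList.getD i ' ' := by
        intro i _
        have : pvHit n i = false := by simp [pvHit]; omega
        simp [this]
      rw [List.map_congr_left this, pv_map_getD_range]
    rw [this]; simp
  · simp only [h, dite_false]
    congr 1
    rw [pv_chunks_ideal]
    unfold pvIdeal
    apply List.map_congr_left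
    intro i hi
    have hn1 : 1 ≤ n := by omega
    have hcast : ((i : Int) + 1) % n = (((i + 1) % n.toNat : Nat) : Int) := by
      push_cast
      rw [Int.toNat_of_nonneg (by omega)]
    have hiff : (((i : Int) + 1) % n = 0 ∧ 1 ≤ n) ↔ ((i + 1) % n.toNat = 0) := by
      rw [hcast]
      constructor
      · rintro ⟨h1, _⟩; exact_mod_cast h1
      · intro h1; exact ⟨by exact_mod_cast h1, hn1⟩
    have hd : pvHit n i = decide ((i + 1) % n.toNat = 0) := by
      simp only [pvHit, decide_eq_decide]
      exact hiff
    by_cases hz : (i + 1) % n.toNat = 0 <;> simp [hd, hz]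

-- ===== VERDICT (by name: the statement is the Claim_ definition above) =====
theorem replaceByZero_spec : Claim_equal_replaceByZero := by
  intro string n _
  unfold Spec_replaceByZero
  rw [pv_A_ideal, pv_B_ideal]
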